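-- pv_equiv track=rewrite | github.com/avinashrajavarapugit/CodeForces | e.py | floor_root
-- ===== SOURCE A (Python) =====
-- def floor_root(n, m):
--     if m == 1:
--         return n
--     low = 0
--     high = n
--     res = 0
--     while low <= high:
--         mid = (low + high) // 2
--         power = 1
--         overflow = False
--         for _ in range(m):
--             power *= mid
--             if power > n:
--                 overflow = True
--                 break
--         if overflow:
--             high = mid - 1
--         else:
--             if power <= n:
--                 res = mid
--                 low = mid + 1
--             else:
--                 high = mid - 1
--     return res
-- ===== SOURCE B (Python) =====
-- def _pow_le(b, e, cap):
--     # is b**e <= cap (b, cap >= 0), by fast exponentiation with capped intermediates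
--     r = 1
--     while e > 0:
--         if e % 2 == 1:
--             r = r * b
--             if r > cap:
--                 return False
--         b2 = b * b
--         b = cap + 1 if b2 > cap else b2
--         e //= 2
--     return r <= cap
--
-- def floor_root(n, m):
--     if m == 1:
--         return n
--     lo, hi, res = 0, n, 0
--     while lo <= hi:
--         mid = (lo + hi) // 2
--         if _pow_le(mid, m, n):
--             res = mid
--             lo = mid + 1
--         else:
--             hi = mid - 1
--     return res
-- ===== Notes on version B (the rewrite author's own statement) =====
-- stated objective: faster
-- what changed: A tests each midpoint by multiplying mid together up to m times (O(m) per probe, and the early-exit never fires at mid 0 or 1); B tests mid^m <= n by square-and-multiply fast exponentiation with intermediates capped at n+1, O(log m * log n) per probe.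
import Mathlib
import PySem

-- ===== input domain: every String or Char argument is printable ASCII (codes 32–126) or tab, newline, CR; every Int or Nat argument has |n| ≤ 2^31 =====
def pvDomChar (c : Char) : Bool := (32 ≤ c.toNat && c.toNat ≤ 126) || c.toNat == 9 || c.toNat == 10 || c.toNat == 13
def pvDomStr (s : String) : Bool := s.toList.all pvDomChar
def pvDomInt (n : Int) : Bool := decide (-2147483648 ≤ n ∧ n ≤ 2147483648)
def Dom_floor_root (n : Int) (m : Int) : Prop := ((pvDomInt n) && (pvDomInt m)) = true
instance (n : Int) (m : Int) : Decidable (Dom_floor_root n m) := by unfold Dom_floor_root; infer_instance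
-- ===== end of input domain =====

-- B replaces A's O(m) repeated-multiplication test by capped fast exponentiation, an asymptotically faster power test.

-- ===== PORT A =====
-- inner `for _ in range(m): power *= mid; if power > n: overflow = True; break`
-- result = (power, overflow)
def floorRootInner (n mid : Int) : Nat → Int → Int × Bool
  | 0, power => (power, false)
  | k + 1, power =>
      let p := power * mid
      if p > n then (p, true) else floorRootInner n mid k p

-- the `while low <= high` loop of A
def floorRootLoop (n m low high res : Int) : Int :=
  if h : low ≤ high then
    let mid := PySem.Int.floordiv (low + high) 2
    let pr := floorRootInner n mid m.toNat 1
    if pr.2 then floorRootLoop n m low (mid - 1) res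
    else if pr.1 ≤ n then floorRootLoop n m (mid + 1) high mid
    else floorRootLoop n m low (mid - 1) res
  else res
termination_by (high + 1 - low).toNat
decreasing_by
  all_goals
    have hb := PySem.Int.floordiv_two_mid_bounds h
    omega

def floor_root (n : Int) (m : Int) : Int :=
  if m = 1 then n
  else floorRootLoop n m 0 n 0

-- ===== PORT B =====
-- the `while e > 0` loop of _pow_le; state = (r, b, e)
def powLeLoop (cap r b e : Int) : Bool :=
  if h : 0 < e then
    if PySem.Int.mod e 2 = 1 then
      let r' := r * b
      if r' > cap then false
      else
        let b2 := b * b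
        powLeLoop cap r' (if b2 > cap then cap + 1 else b2) (PySem.Int.floordiv e 2)
    else
      let b2 := b * b
      powLeLoop cap r (if b2 > cap then cap + 1 else b2) (PySem.Int.floordiv e 2)
  else decide (r ≤ cap)
termination_by e.toNat
decreasing_by
  all_goals
    have h1 := PySem.Int.floordiv_eq_ediv_of_pos (a := e) (b := 2) (by omega)
    omega

-- _pow_le b e cap
def powLe (b e cap : Int) : Bool := powLeLoop cap 1 b e

-- the `while lo <= hi` loop of B
def floorRootAltLoop (n m low high res : Int) : Int :=
  if h : low ≤ high then
    let mid := PySem.Int.floordiv (low + high) 2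
    if powLe mid m n then floorRootAltLoop n m (mid + 1) high mid
    else floorRootAltLoop n m low (mid - 1) res
  else res
termination_by (high + 1 - low).toNat
decreasing_by
  all_goals
    have hb := PySem.Int.floordiv_two_mid_bounds h
    omega

def floor_root_alt (n : Int) (m : Int) : Int :=
  if m = 1 then n
  else floorRootAltLoop n m 0 n 0

-- ===== PRECONDITION & SPEC =====
def Spec_floor_root (n : Int) (m : Int) (out : Int) : Prop := out = floor_root_alt n m
instance (n : Int) (m : Int) (out : Int) : Decidable (Spec_floor_root n m out) := by unfold Spec_floor_root; infer_instance

-- ===== CLAIM (what is proved, stated in full; the proofs are below) =====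
def Claim_equal_floor_root : Prop := ∀ (n : Int) (m : Int), Dom_floor_root n m → Spec_floor_root n m (floor_root n m)

-- ===== LEMMAS AND PROOFS =====

-- A's test: the break-loop succeeds (no overflow, final power ≤ n) iff p * mid^e ≤ n.
theorem floorRootInner_success (n mid : Int) (e : Nat) :
    ∀ p : Int, 0 ≤ p → 0 ≤ mid → 0 ≤ n →
    (((floorRootInner n mid e p).2 = false ∧ (floorRootInner n mid e p).1 ≤ n) ↔ p * mid ^ e ≤ n) := by
  induction e with
  | zero => intro p hp hm hn; simp [floorRootInner]
  | succ k ih =>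
      intro p hp hm hn
      simp only [floorRootInner]
      by_cases hbr : p * mid > n
      · simp only [if_pos hbr]
        constructor
        · rintro ⟨h, -⟩; simp at h
        · intro hle
          exfalso
          have hmid1 : 1 ≤ mid := by
            rcases eq_or_lt_of_le hm with h | h
            · rw [← h] at hbr; simp at hbr; omega
            · omega
          have hq1 : 1 ≤ p * mid := by omega
          have hpow : (1 : Int) ≤ mid ^ k := one_le_pow₀ hmid1
          have : p * mid * 1 ≤ p * mid * mid ^ k := by
            apply mul_le_mul_of_nonneg_left hpow (by omega)
          have : p * mid ≤ p * mid ^ (k + 1) := by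
            calc p * mid = p * mid * 1 := by ring
            _ ≤ p * mid * mid ^ k := this
            _ = p * mid ^ (k + 1) := by ring
          omega
      · simp only [if_neg hbr]
        have := ih (p * mid) (mul_nonneg hp hm) hm hn
        rw [this]
        constructor <;> intro hle
        · calc p * mid ^ (k + 1) = p * mid * mid ^ k := by ring
            _ ≤ n := hle
        · calc p * mid * mid ^ k = p * mid ^ (k + 1) := by ring
            _ ≤ n := hle

-- Clamping b to cap+1 does not change the predicate r * b^k ≤ cap.
theorem clamp_pow_le (cap r b : Int) (k : Nat) (hr : 0 ≤ r) (hc : 0 ≤ cap) (hb : cap < b) :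
    (r * b ^ k ≤ cap ↔ r * (cap + 1) ^ k ≤ cap) := by
  rcases Nat.eq_zero_or_pos k with hk | hk
  · subst hk; simp
  · rcases eq_or_lt_of_le hr with hr0 | hr1
    · simp [← hr0, hc]
    · have hb1 : 1 ≤ b := by omega
      have aux : ∀ c : Int, cap < c → ¬ r * c ^ k ≤ cap := by
        intro c hcgt hle
        have hc1 : 1 ≤ c := by omega
        have hpw : c ≤ c ^ k := le_self_pow₀ hc1 (by omega)
        have : c ≤ r * c ^ k := by
          calc c ≤ c ^ k := hpw
          _ = 1 * c ^ k := by ring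
          _ ≤ r * c ^ k := by
              apply mul_le_mul_of_nonneg_right (by omega)
              positivity
        omega
      constructor
      · intro h; exact absurd h (aux b hb)
      · intro h; exact absurd h (aux (cap + 1) (by omega))

-- B's test: the fast-exponentiation loop computes r * b^(e.toNat) ≤ cap.
theorem powLeLoop_eq (cap : Int) (hc : 0 ≤ cap) :
    ∀ (k : Nat) (r b e : Int), e.toNat ≤ k → 0 ≤ r → 0 ≤ b →
    powLeLoop cap r b e = decide (r * b ^ e.toNat ≤ cap) := by
  intro k
  induction k with
  | zero =>
      intro r b e hk hr hb
      have he : ¬ 0 < e := by omega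
      rw [powLeLoop, dif_neg he]
      have : e.toNat = 0 := by omega
      simp [this]
  | succ k ih =>
      intro r b e hk hr hb
      by_cases he : 0 < e
      · have hdiv : PySem.Int.floordiv e 2 = e / 2 :=
          PySem.Int.floordiv_eq_ediv_of_pos (by omega)
        have hmod : PySem.Int.mod e 2 = e % 2 :=
          PySem.Int.mod_eq_emod_of_pos (by omega)
        have he2 : (e / 2).toNat ≤ k := by omega
        have hsplit : e.toNat = 2 * (e / 2).toNat + (e % 2).toNat := by omega
        have hb2 : (0 : Int) ≤ (if b * b > cap then cap + 1 else b * b) := by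
          split <;> nlinarith
        have hclamp : ∀ r'' : Int, 0 ≤ r'' →
            (r'' * (if b * b > cap then cap + 1 else b * b) ^ (e / 2).toNat ≤ cap
              ↔ r'' * (b * b) ^ (e / 2).toNat ≤ cap) := by
          intro r'' hr''
          split
          next hgt => exact (clamp_pow_le cap r'' (b * b) _ hr'' hc hgt).symm
          next => rfl
        rw [powLeLoop, dif_pos he]
        by_cases hodd : PySem.Int.mod e 2 = 1
        · rw [if_pos hodd]
          rw [hmod] at hodd
          have hsplit1 : e.toNat = 2 * (e / 2).toNat + 1 := by omega
          simp only
          by_cases hgt : r * b > cap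
          · rw [if_pos hgt]
            have : ¬ r * b ^ e.toNat ≤ cap := by
              intro hle
              have hbpos : 1 ≤ b := by
                rcases eq_or_lt_of_le hb with h0 | h1
                · exfalso; rw [← h0] at hgt; simp at hgt; omega
                · omega
              have h1 : (1 : Int) ≤ b ^ (2 * (e / 2).toNat) := one_le_pow₀ hbpos
              have : r * b ≤ r * b ^ e.toNat := by
                calc r * b = r * b * 1 := by ring
                _ ≤ r * b * b ^ (2 * (e / 2).toNat) := by
                    apply mul_le_mul_of_nonneg_left h1 (by omega)
                _ = r * b ^ (2 * (e / 2).toNat + 1) := by ring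
                _ = r * b ^ e.toNat := by rw [← hsplit1]
              omega
            simp [this]
          · rw [if_neg hgt, hdiv]
            rw [ih (r * b) _ (e / 2) he2 (mul_nonneg hr hb) hb2]
            rw [decide_eq_decide, hclamp (r * b) (mul_nonneg hr hb)]
            have heq : r * b * (b * b) ^ (e / 2).toNat = r * b ^ e.toNat := by
              rw [hsplit1, pow_succ, pow_mul]; ring_nf
            rw [heq]
        · rw [if_neg hodd]
          rw [hmod] at hodd
          have hmod01 : e % 2 = 0 ∨ e % 2 = 1 := by omega
          have hsplit0 : e.toNat = 2 * (e / 2).toNat := by omega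
          simp only
          rw [hdiv, ih r _ (e / 2) he2 hr hb2]
          rw [decide_eq_decide, hclamp r hr]
          have heq : r * (b * b) ^ (e / 2).toNat = r * b ^ e.toNat := by
            rw [hsplit0, pow_mul]; ring_nf
          rw [heq]
      · rw [powLeLoop, dif_neg he]
        have h0 : e.toNat = 0 := by omega
        simp [h0]

-- The two binary-search loops agree once the two power tests agree.
theorem loops_eq (n m : Int) (hn : 0 ≤ n) :
    ∀ (k : Nat) (low high res : Int), (high + 1 - low).toNat ≤ k → 0 ≤ low →
    floorRootLoop n m low high res = floorRootAltLoop n m low high res := by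
  intro k
  induction k with
  | zero =>
      intro low high res hk hlow
      have h : ¬ low ≤ high := by omega
      rw [floorRootLoop, dif_neg h, floorRootAltLoop, dif_neg h]
  | succ k ih =>
      intro low high res hk hlow
      by_cases h : low ≤ high
      · rw [floorRootLoop, dif_pos h, floorRootAltLoop, dif_pos h]
        have hb := PySem.Int.floordiv_two_mid_bounds h
        set mid := PySem.Int.floordiv (low + high) 2 with hmid
        have hmid0 : 0 ≤ mid := by omega
        have htestA := floorRootInner_success n mid m.toNat 1 (by omega) hmid0 hn
        have htestB : powLe mid m n = decide ((1 : Int) * mid ^ m.toNat ≤ n) := by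
          unfold powLe
          exact powLeLoop_eq n hn m.toNat 1 mid m (le_refl _) (by omega) hmid0
        simp only [one_mul] at htestA htestB
        simp only
        by_cases hsucc : mid ^ m.toNat ≤ n
        · have hA := htestA.mpr hsucc
          have hBtrue : powLe mid m n = true := by rw [htestB]; simp [hsucc]
          rw [hA.1, hBtrue, if_neg Bool.false_ne_true, if_pos hA.2, if_pos rfl]
          exact ih (mid + 1) high mid (by omega) (by omega)
        · have hBfalse : powLe mid m n = false := by rw [htestB]; simp [hsucc]
          have hAfail : ¬ ((floorRootInner n mid m.toNat 1).2 = false ∧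
              (floorRootInner n mid m.toNat 1).1 ≤ n) := fun hh => hsucc (htestA.mp hh)
          rw [hBfalse]
          cases hov : (floorRootInner n mid m.toNat 1).2 with
          | true =>
              rw [if_pos rfl, if_neg Bool.false_ne_true]
              exact ih low (mid - 1) res (by omega) hlow
          | false =>
              have hgt : ¬ (floorRootInner n mid m.toNat 1).1 ≤ n := fun hle => hAfail ⟨hov, hle⟩
              rw [if_neg Bool.false_ne_true, if_neg hgt, if_neg Bool.false_ne_true]
              exact ih low (mid - 1) res (by omega) hlow
      · rw [floorRootLoop, dif_neg h, floorRootAltLoop, dif_neg h]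

-- ===== VERDICT (by name: the statement is the Claim_ definition above) =====
theorem floor_root_spec : Claim_equal_floor_root := by
  intro n m _
  unfold Spec_floor_root floor_root floor_root_alt
  by_cases hm : m = 1
  · rw [if_pos hm, if_pos hm]
  · rw [if_neg hm, if_neg hm]
    by_cases hn : 0 ≤ n
    · exact loops_eq n m hn (n + 1 - 0).toNat 0 n 0 (le_refl _) (le_refl _)
    · rw [floorRootLoop, dif_neg hn, floorRootAltLoop, dif_neg hn]
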